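-- pv_equiv track=rewrite | github.com/TobiasWallstrom/ENM140-project | strategies.py | respond_to_help
-- ===== SOURCE A (Python) =====
-- def respond_to_help(player, requester_id, favor_size, interaction_history):
--     """
--     Respond to help based on the Tit-for-Tat principle.
--     Cooperates if the requester cooperated in the past, otherwise refuses.
--     Ignores "busy" outcomes.
--     """
--     for past_requester_id, outcome, favor_size in interaction_history[::-1]:
--         if past_requester_id == requester_id:
--             # Cooperate if the requester cooperated before
--             if outcome == "cooperate":
--                 return True
--             # Reject if the requester rejected before
--             elif outcome == "reject":
--                 return False
--
--     # Default to cooperation if no history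
--     return True
-- ===== SOURCE B (Python) =====
-- def respond_to_help(player, requester_id, favor_size, interaction_history):
--     decisions = [outcome for pid, outcome, _ in interaction_history
--                  if pid == requester_id and outcome in ("cooperate", "reject")]
--     return decisions[-1] == "cooperate" if decisions else True
-- ===== Notes on version B (the rewrite author's own statement) =====
-- stated objective: alternative
-- what changed: Replaces the reversed-list scan with early return by a filter pass that collects all relevant cooperate/reject outcomes and then decides from the last collected one (default True when none).
import Mathlib
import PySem

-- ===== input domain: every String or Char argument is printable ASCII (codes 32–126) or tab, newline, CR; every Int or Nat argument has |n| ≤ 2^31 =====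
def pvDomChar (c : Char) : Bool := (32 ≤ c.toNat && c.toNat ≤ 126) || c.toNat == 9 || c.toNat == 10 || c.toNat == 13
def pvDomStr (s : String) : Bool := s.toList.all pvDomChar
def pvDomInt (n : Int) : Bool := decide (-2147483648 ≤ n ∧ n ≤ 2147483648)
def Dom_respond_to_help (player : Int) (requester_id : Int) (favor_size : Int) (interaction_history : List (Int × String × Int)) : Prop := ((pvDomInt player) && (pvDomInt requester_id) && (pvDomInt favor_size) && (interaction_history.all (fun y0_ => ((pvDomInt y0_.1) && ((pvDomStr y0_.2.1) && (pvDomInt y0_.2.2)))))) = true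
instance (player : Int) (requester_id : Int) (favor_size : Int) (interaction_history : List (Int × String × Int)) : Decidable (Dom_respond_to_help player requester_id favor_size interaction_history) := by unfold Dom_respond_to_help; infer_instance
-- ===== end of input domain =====

-- B replaces A's reversed scan with early return by a filter pass collecting relevant cooperate/reject outcomes, deciding from the last one (alternative decomposition, same O(n) cost).


-- ===== PORT A =====
-- A's loop over the reversed history, early return via recursion
def rthLoopA (requester_id : Int) : List (Int × String × Int) → Bool
  | [] => true
  | (past_requester_id, outcome, _) :: rest =>
      if past_requester_id = requester_id then
        if outcome = "cooperate" then true
        else if outcome = "reject" then false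
        else rthLoopA requester_id rest
      else rthLoopA requester_id rest

-- interaction_history[::-1] is List.reverse
def respond_to_help (player : Int) (requester_id : Int) (favor_size : Int) (interaction_history : List (Int × String × Int)) : Bool :=
  rthLoopA requester_id interaction_history.reverse

-- ===== PORT B =====
-- B: list comprehension = filter + map; decide from the last collected outcome
def rthRelevant (requester_id : Int) (e : Int × String × Int) : Bool :=
  e.1 == requester_id && (e.2.1 == "cooperate" || e.2.1 == "reject")

def respond_to_help_alt (player : Int) (requester_id : Int) (favor_size : Int) (interaction_history : List (Int × String × Int)) : Bool :=
  let decisions := (interaction_history.filter (rthRelevant requester_id)).map (fun e => e.2.1)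
  match decisions.getLast? with
  | none => true
  | some o => o == "cooperate"

-- ===== PRECONDITION & SPEC =====
def Spec_respond_to_help (player : Int) (requester_id : Int) (favor_size : Int) (interaction_history : List (Int × String × Int)) (out : Bool) : Prop := out = respond_to_help_alt player requester_id favor_size interaction_history
instance (player : Int) (requester_id : Int) (favor_size : Int) (interaction_history : List (Int × String × Int)) (out : Bool) : Decidable (Spec_respond_to_help player requester_id favor_size interaction_history out) := by unfold Spec_respond_to_help; infer_instance

-- ===== CLAIM (what is proved, stated in full; the proofs are below) =====
def Claim_equal_respond_to_help : Prop := ∀ (player : Int) (requester_id : Int) (favor_size : Int) (interaction_history : List (Int × String × Int)), Dom_respond_to_help player requester_id favor_size interaction_history → Spec_respond_to_help player requester_id favor_size interaction_history (respond_to_help player requester_id favor_size interaction_history)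

-- ===== LEMMAS AND PROOFS =====

-- ===== VERDICT (by name: the statement is the Claim_ definition above) =====
theorem rthLoopA_eq (rid : Int) (ys : List (Int × String × Int)) :
    rthLoopA rid ys =
      (match (ys.filter (rthRelevant rid)).head? with
       | none => true
       | some e => (e.2.1 == "cooperate")) := by
  induction ys with
  | nil => rfl
  | cons p rest ih =>
    obtain ⟨pid, outcome, fs⟩ := p
    simp only [rthLoopA, List.filter_cons]
    by_cases hp : pid = rid
    · subst hp
      by_cases hc : outcome = "cooperate"
      · simp [rthRelevant, hc]
      · by_cases hr : outcome = "reject"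
        · simp [rthRelevant, hr]
        · simpa [rthRelevant, hc, hr] using ih
    · simpa [rthRelevant, hp] using ih

theorem respond_to_help_spec : Claim_equal_respond_to_help := by
  intro player requester_id favor_size interaction_history _
  unfold Spec_respond_to_help respond_to_help respond_to_help_alt
  rw [rthLoopA_eq, List.filter_reverse, List.head?_reverse]
  cases h : (interaction_history.filter (rthRelevant requester_id)).getLast? with
  | none => simp [h, List.getLast?_map]
  | some e => simp [h, List.getLast?_map]
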